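-- pv_equiv track=rewrite | github.com/truongthinh118/cash_flow_expectation | Main.py | check_interval_value
-- ===== SOURCE A (Python) =====
-- def check_interval_value(list, value):
--     mapping = []
--     for item in list:
--         mapping.append((item,list.index(item)))
--
--     for scale, output in mapping:
--         if value == scale:
--             return output
--         elif value < scale:
--             return output - 1
-- ===== SOURCE B (Python) =====
-- def check_interval_value(list, value):
--     for i, item in enumerate(list):
--         if value == item:
--             return i
--         if value < item:
--             return i - 1
--     return None
-- ===== Notes on version B (the rewrite author's own statement) =====
-- stated objective: faster
-- what changed: B drops A's quadratic build-a-(item,list.index(item))-table pass and scans once with enumerate, returning i on equality and i-1 on first exceeding item (the first item with value <= item is always at its own first occurrence, so the enumerate index equals list.index).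
import Mathlib
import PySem

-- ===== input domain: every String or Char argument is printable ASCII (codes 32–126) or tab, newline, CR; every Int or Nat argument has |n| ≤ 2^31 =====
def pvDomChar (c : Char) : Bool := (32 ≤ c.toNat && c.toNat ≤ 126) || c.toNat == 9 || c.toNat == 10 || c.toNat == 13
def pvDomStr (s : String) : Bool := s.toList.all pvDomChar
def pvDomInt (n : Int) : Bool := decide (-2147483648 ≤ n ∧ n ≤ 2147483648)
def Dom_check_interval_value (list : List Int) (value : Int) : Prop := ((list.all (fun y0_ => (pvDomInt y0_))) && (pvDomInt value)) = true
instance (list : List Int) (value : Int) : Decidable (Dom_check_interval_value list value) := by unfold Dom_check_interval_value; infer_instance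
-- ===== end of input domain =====

-- B: single enumerate pass instead of A's quadratic (item, list.index(item)) table + scan.
-- ===== PORT A =====
-- second loop of A: scan the mapping pairs (scale, output) in order
def pvScanA (value : Int) : List (Int × Int) → Option Int
  | [] => none
  | (scale, output) :: rest =>
      if value = scale then some output
      else if value < scale then some (output - 1)
      else pvScanA value rest

def check_interval_value (list : List Int) (value : Int) : Option Int :=
  -- first loop: mapping.append((item, list.index(item))); the index lookup never
  -- raises since item ∈ list, so the Option from index? is defaulted (unreachable).
  let mapping := list.foldl
    (fun acc item => acc ++ [(item, (((PySem.List.index? list item).getD 0 : Nat) : Int))]) []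
  pvScanA value mapping

-- ===== PORT B =====
def pvGoB (value : Int) : List Int → Int → Option Int
  | [], _ => none
  | item :: rest, i =>
      if value = item then some i
      else if value < item then some (i - 1)
      else pvGoB value rest (i + 1)

def check_interval_value_alt (list : List Int) (value : Int) : Option Int :=
  pvGoB value list 0

-- ===== PRECONDITION & SPEC =====
def Spec_check_interval_value (list : List Int) (value : Int) (out : Option Int) : Prop := out = check_interval_value_alt list value
instance (list : List Int) (value : Int) (out : Option Int) : Decidable (Spec_check_interval_value list value out) := by unfold Spec_check_interval_value; infer_instance

-- ===== CLAIM (what is proved, stated in full; the proofs are below) =====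
def Claim_equal_check_interval_value : Prop := ∀ (list : List Int) (value : Int), Dom_check_interval_value list value → Spec_check_interval_value list value (check_interval_value list value)

-- ===== LEMMAS AND PROOFS =====

-- ===== VERDICT (by name: the statement is the Claim_ definition above) =====
-- A's mapping fold is the map of (item, first index of item in list)
theorem pv_fold_eq_map (l : List Int) (f : Int → Int) (init : List (Int × Int)) :
    l.foldl (fun acc item => acc ++ [(item, f item)]) init = init ++ l.map (fun item => (item, f item)) := by
  induction l generalizing init with
  | nil => simp
  | cons x xs ih => simp [List.foldl, ih]

theorem pv_index_first (pre rest : List Int) (x : Int) (hx : x ∉ pre) :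
    PySem.List.index? (pre ++ x :: rest) x = some pre.length := by
  exact (PySem.List.index?_eq_some_iff _ _ _).mpr ⟨pre, rest, rfl, rfl, hx⟩

-- main invariant: scanning A's mapping of the suffix equals B's counted scan,
-- provided every element of the already-passed prefix is strictly below value.
theorem pv_key (value : Int) (suf : List Int) : ∀ (pre : List Int), (∀ x ∈ pre, x < value) →
    pvScanA value (suf.map (fun item => (item, (((PySem.List.index? (pre ++ suf) item).getD 0 : Nat) : Int)))) =
      pvGoB value suf (pre.length : Int) := by
  induction suf with
  | nil => intro pre _; simp [pvScanA, pvGoB]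
  | cons item rest ih =>
      intro pre hpre
      have hsplit : ∀ h : value = item ∨ value < item,
          PySem.List.index? (pre ++ item :: rest) item = some pre.length := by
        intro h
        apply pv_index_first
        intro hmem
        have := hpre item hmem
        rcases h with h | h <;> omega
      by_cases h1 : value = item
      · have h := hsplit (Or.inl h1)
        rw [PySem.List.index?_eq_idxOf?] at h
        simp [pvScanA, pvGoB, h1, h]
      · by_cases h2 : value < item
        · have h := hsplit (Or.inr h2)
          rw [PySem.List.index?_eq_idxOf?] at h
          simp [pvScanA, pvGoB, h1, h2, h]
        · have hlt : item < value := by omega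
          have hrec := ih (pre ++ [item]) (by
            intro x hx
            rcases List.mem_append.mp hx with hx | hx
            · exact hpre x hx
            · simp at hx; omega)
          simp only [List.append_assoc, List.singleton_append, List.length_append,
            List.length_singleton, PySem.List.index?_eq_idxOf?, Nat.cast_add,
            Nat.cast_one] at hrec
          simp [pvScanA, pvGoB, h1, h2]
          exact hrec

theorem check_interval_value_spec : Claim_equal_check_interval_value := by
  intro list value _
  unfold Spec_check_interval_value check_interval_value check_interval_value_alt
  simp only [pv_fold_eq_map, List.nil_append]
  have := pv_key value list [] (by simp)
  simpa using this
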